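-- pv_equiv track=rewrite | github.com/SurajSaravanan/Personal-Projects | Project3.py | addlst
-- ===== SOURCE A (Python) =====
-- def addlst(lst):
--     result = []
--     sum = 0
--     for index in range(len(lst)):
--         if index % 2 != 0:
--             sum = lst[index] + sum
--         result.append(lst[index])
--     result.append(sum)
--     return result
-- ===== SOURCE B (Python) =====
-- def addlst(lst):
--     it = iter(lst)
--     total = 0
--     for _ in it:
--         total += next(it, 0)
--     return list(lst) + [total]
-- ===== Notes on version B (the rewrite author's own statement) =====
-- stated objective: alternative
-- what changed: Replaces the single index loop with a parity test by a two-part decomposition: copy the list wholesale, then sum the odd-indexed elements by consuming an iterator two elements at a time (no indices, no parity arithmetic).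
import Mathlib
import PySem

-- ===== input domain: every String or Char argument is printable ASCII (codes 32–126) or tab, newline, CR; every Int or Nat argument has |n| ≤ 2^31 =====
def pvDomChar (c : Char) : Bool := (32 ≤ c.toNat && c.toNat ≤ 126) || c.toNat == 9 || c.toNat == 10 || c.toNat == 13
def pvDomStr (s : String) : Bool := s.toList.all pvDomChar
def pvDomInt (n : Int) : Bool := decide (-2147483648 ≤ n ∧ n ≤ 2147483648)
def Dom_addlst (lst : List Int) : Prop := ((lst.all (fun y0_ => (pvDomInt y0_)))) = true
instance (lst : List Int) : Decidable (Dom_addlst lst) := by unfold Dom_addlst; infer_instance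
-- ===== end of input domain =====

-- B replaces A's index loop with parity test by whole-list copy + a pairwise iterator pass (consume two at a time, add the second): alternative decomposition, same cost.


-- ===== PORT A =====
-- literal transliteration: loop over range(len(lst)), parity test on the index,
-- running sum and result accumulator; lst[index] is always in range, ported as pyGetD … 0.
def addlst (lst : List Int) : List Int :=
  let st := (PySem.List.pyRange 0 lst.length 1).foldl
    (fun (st : List Int × Int) (index : Int) =>
      let s := if index % 2 ≠ 0 then PySem.List.pyGetD lst index 0 + st.2 else st.2
      (st.1 ++ [PySem.List.pyGetD lst index 0], s))
    ([], 0)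
  st.1 ++ [st.2]

-- ===== PORT B =====
-- Source B consumes the list two elements at a time via an iterator (skip one, add the next,
-- next's default 0 covers the odd-length tail); ported as the same two-at-a-time recursion.
def pvOddSum : List Int → Int
  | [] => 0
  | [_] => 0
  | _ :: y :: rest => y + pvOddSum rest

def addlst_alt (lst : List Int) : List Int := lst ++ [pvOddSum lst]

-- ===== PRECONDITION & SPEC =====
def Spec_addlst (lst : List Int) (out : List Int) : Prop := out = addlst_alt lst
instance (lst : List Int) (out : List Int) : Decidable (Spec_addlst lst out) := by unfold Spec_addlst; infer_instance

-- ===== CLAIM (what is proved, stated in full; the proofs are below) =====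
def Claim_equal_addlst : Prop := ∀ (lst : List Int), Dom_addlst lst → Spec_addlst lst (addlst lst)

-- ===== LEMMAS AND PROOFS =====

-- parity-tracking sum: b says the current position is odd
def pvPSum (b : Bool) : List Int → Int
  | [] => 0
  | x :: r => (if b then x else 0) + pvPSum (!b) r

theorem pvPSum_eq_oddSum : ∀ (l : List Int),
    pvPSum false l = pvOddSum l ∧
    pvPSum true l = (match l with | [] => 0 | y :: r => y + pvOddSum r) := by
  intro l
  induction l with
  | nil => simp [pvPSum, pvOddSum]
  | cons x r ih =>
    constructor
    · simp [pvPSum, ih.2]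
      cases r with
      | nil => simp [pvOddSum]
      | cons y r' => simp [pvOddSum]
    · simp [pvPSum, ih.1]

theorem addlst_fold_eq (lst : List Int) : ∀ (m : Nat) (k : Nat), k + m = lst.length →
    ∀ (res : List Int) (s : Int),
    (PySem.List.pyRange (k : Int) (lst.length : Int) 1).foldl
      (fun (st : List Int × Int) (index : Int) =>
        let s := if index % 2 ≠ 0 then PySem.List.pyGetD lst index 0 + st.2 else st.2
        (st.1 ++ [PySem.List.pyGetD lst index 0], s))
      (res, s)
    = (res ++ lst.drop k, s + pvPSum (decide ((k : Int) % 2 ≠ 0)) (lst.drop k)) := by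
  intro m
  induction m with
  | zero =>
    intro k hk res s
    rw [PySem.List.pyRange_one_eq_nil (by omega)]
    rw [List.drop_eq_nil_of_le (by omega)]
    simp [pvPSum]
  | succ m ih =>
    intro k hk res s
    have hklt : (k : Int) < (lst.length : Int) := by omega
    rw [PySem.List.pyRange_one_cons hklt]
    have hk1 : ((k : Int) + 1) = ((k + 1 : Nat) : Int) := by push_cast; ring
    have hkl : k < lst.length := by omega
    simp only [List.foldl_cons]
    rw [hk1, ih (k + 1) (by omega)]
    have hget : PySem.List.pyGetD lst ((k : Nat) : Int) 0 = lst[k] := by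
      rw [PySem.List.pyGetD_eq_getElem lst 0 (by omega) (by exact_mod_cast hklt)]
      simp
    have hdrop : lst.drop k = lst[k] :: lst.drop (k + 1) :=
      List.drop_eq_getElem_cons hkl
    rw [hdrop]
    simp only [pvPSum, hget]
    refine Prod.ext ?_ ?_
    · simp
    · simp only []
      by_cases h : ((k : Nat) : Int) % 2 = 0
      · have h2 : ((k : Int) + 1) % 2 = 1 := by omega
        simp [h, h2]
      · have h2 : ((k : Int) + 1) % 2 ≠ 1 := by omega
        simp [h, h2]
        ring
-- ===== VERDICT (by name: the statement is the Claim_ definition above) =====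
theorem addlst_spec : Claim_equal_addlst := by
  intro lst _
  unfold Spec_addlst addlst addlst_alt
  have h := addlst_fold_eq lst lst.length 0 (by omega) [] 0
  simp only [Int.natCast_zero] at h
  rw [h]
  simp [(pvPSum_eq_oddSum lst).1]
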